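-- pv_equiv track=rewrite | github.com/gquere/genmasks | gen_masks_from_dump.py | keyspace_of_mask
-- ===== SOURCE A (Python) =====
-- def keyspace_of_mask(mask):
--     keyspace = 1
--     for charset in mask:
--         if charset == 'd':
--             keyspace *= 10
--         elif charset == 'l':
--             keyspace *= 26
--         elif charset == 'u':
--             keyspace *= 26
--         elif charset == 's':
--             keyspace *= 33
--
--     return keyspace
-- ===== SOURCE B (Python) =====
-- def keyspace_of_mask(mask):
--     d = mask.count('d')
--     l = mask.count('l')
--     u = mask.count('u')
--     s = mask.count('s')
--     return 10 ** d * 26 ** (l + u) * 33 ** s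
-- ===== Notes on version B (the rewrite author's own statement) =====
-- stated objective: faster
-- what changed: Replaced the char-by-char multiplicative accumulation with four str.count passes and a closed-form product of powers 10**d * 26**(l+u) * 33**s.
import Mathlib
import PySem

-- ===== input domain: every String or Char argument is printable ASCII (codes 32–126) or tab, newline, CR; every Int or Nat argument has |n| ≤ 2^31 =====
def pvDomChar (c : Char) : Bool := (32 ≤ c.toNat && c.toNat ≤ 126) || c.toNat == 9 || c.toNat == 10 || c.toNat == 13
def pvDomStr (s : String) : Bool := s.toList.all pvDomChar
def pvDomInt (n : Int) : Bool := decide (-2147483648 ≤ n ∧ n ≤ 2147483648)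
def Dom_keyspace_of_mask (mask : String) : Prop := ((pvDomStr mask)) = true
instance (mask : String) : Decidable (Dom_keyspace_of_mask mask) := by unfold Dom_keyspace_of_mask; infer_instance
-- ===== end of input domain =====

-- B replaces A's char-by-char multiplicative accumulation with four count passes and a closed-form product of powers (faster by a constant factor: counting runs in C).

-- ===== PORT A =====
-- literal port of A: keyspace = 1; for charset in mask: if/elif chain multiplying keyspace
def keyspace_of_mask (mask : String) : Int :=
  mask.toList.foldl
    (fun keyspace charset =>
      if charset = 'd' then keyspace * 10
      else if charset = 'l' then keyspace * 26
      else if charset = 'u' then keyspace * 26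
      else if charset = 's' then keyspace * 33
      else keyspace)
    1

-- ===== PORT B =====
-- literal port of Source B: four mask.count(...) calls, then the closed-form product
def keyspace_of_mask_alt (mask : String) : Int :=
  let d := PySem.Str.count mask "d"
  let l := PySem.Str.count mask "l"
  let u := PySem.Str.count mask "u"
  let s := PySem.Str.count mask "s"
  (10 : Int) ^ d * 26 ^ (l + u) * 33 ^ s

-- ===== PRECONDITION & SPEC =====
def Spec_keyspace_of_mask (mask : String) (out : Int) : Prop := out = keyspace_of_mask_alt mask
instance (mask : String) (out : Int) : Decidable (Spec_keyspace_of_mask mask out) := by unfold Spec_keyspace_of_mask; infer_instance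

-- ===== CLAIM (what is proved, stated in full; the proofs are below) =====
def Claim_equal_keyspace_of_mask : Prop := ∀ (mask : String), Dom_keyspace_of_mask mask → Spec_keyspace_of_mask mask (keyspace_of_mask mask)

-- ===== LEMMAS AND PROOFS =====

-- Python's str.count with a single-character needle is List.count (B's side in list form)
theorem count_go_single (c : Char) : ∀ (cs : List Char) (acc : Nat),
    PySem.Chars.count.go [c] cs.length cs acc = acc + cs.count c := by
  intro cs
  induction cs with
  | nil => intro acc; simp [PySem.Chars.count.go]
  | cons h t ih =>
      intro acc
      by_cases hc : c = h
      · subst hc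
        simp [PySem.Chars.count.go, List.isPrefixOf, ih]
        omega
      · have hne : ¬ (c == h) = true := by simp [hc]
        simp [PySem.Chars.count.go, List.isPrefixOf, hne, ih, Ne.symm hc]

theorem count_single (cs : List Char) (c : Char) :
    PySem.Chars.count cs [c] = cs.count c := by
  simp [PySem.Chars.count, count_go_single]

-- A's fold in closed form
theorem foldA (cs : List Char) : ∀ (acc : Int),
    cs.foldl
      (fun keyspace charset =>
        if charset = 'd' then keyspace * 10
        else if charset = 'l' then keyspace * 26
        else if charset = 'u' then keyspace * 26
        else if charset = 's' then keyspace * 33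
        else keyspace)
      acc
    = acc * (10 ^ cs.count 'd' * 26 ^ (cs.count 'l' + cs.count 'u') * 33 ^ cs.count 's') := by
  induction cs with
  | nil => intro acc; simp
  | cons h t ih =>
      intro acc
      simp only [List.foldl_cons]
      split_ifs with h1 h2 h3 h4 <;> rw [ih] <;> subst_vars <;>
        simp_all [pow_succ] <;> ring

-- ===== VERDICT (by name: the statement is the Claim_ definition above) =====
theorem keyspace_of_mask_spec : Claim_equal_keyspace_of_mask := by
  intro mask _
  show keyspace_of_mask mask = keyspace_of_mask_alt mask
  unfold keyspace_of_mask keyspace_of_mask_alt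
  rw [foldA]
  simp [count_single]
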